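-- pv_equiv track=rewrite | github.com/5n10sndkts-eng/entropy-lab-rs | scripts/generate_ripemd160_wgsl.py | generate_round
-- ===== SOURCE A (Python) =====
-- f_functions = {
--     "F1": "(b ^ c ^ d)",
--     "F2": "((b & c) | ((~b) & d))",
--     "F3": "((b | (~c)) ^ d)",
--     "F4": "((b & d) | (c & (~d)))",
--     "F5": "(b ^ (c | (~d)))",
-- }
--
-- def generate_round(round_name, f_left, k_left, f_right, k_right, round_data):
--     """Generate WGSL code for one round."""
--     lines = [f"    // {round_name.capitalize()}: {f_left} left, {f_right} right"]
--
--     for vars_str, r_left, s_left, r_right, s_right in round_data: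
--         # Parse variable order
--         vars_list = vars_str.split(',')
--         a, b, c, d, e = [v.lower() for v in vars_list]
--         ap, bp, cp, dp, ep = [v.lower() + 'p' for v in vars_list]
--
--         # Get function expressions - use placeholders to avoid cascading replacements
--         def apply_func(func_expr, var_map):
--             """Apply function with variable mapping using placeholders."""
--             # First pass: replace with placeholders
--             result = func_expr
--             for old in var_map:
--                 result = result.replace(old, f'___{old}___')
--             # Second pass: replace placeholders with actual values
--             for old, new in var_map.items():
--                 result = result.replace(f'___{old}___', new)
--             return result
--
--         f_left_expr = apply_func(f_functions[f_left], {'b': b, 'c': c, 'd': d})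
--         f_right_expr = apply_func(f_functions[f_right], {'b': bp, 'c': cp, 'd': dp})
--
--         # Generate left path
--         left_line = f"    {a} += {f_left_expr} + block[{r_left}] + {k_left}; {a} = rol({a}, {s_left}u) + {e}; {c} = rol({c}, 10u);"
--         lines.append(left_line)
--
--         # Generate right path
--         right_line = f"    {ap} += {f_right_expr} + block[{r_right}] + {k_right}; {ap} = rol({ap}, {s_right}u) + {ep}; {cp} = rol({cp}, 10u);"
--         lines.append(right_line)
--
--     return '\n'.join(lines)
-- ===== SOURCE B (Python) =====
-- F_EXPRS = {
--     "F1": lambda b, c, d: f"({b} ^ {c} ^ {d})",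
--     "F2": lambda b, c, d: f"(({b} & {c}) | ((~{b}) & {d}))",
--     "F3": lambda b, c, d: f"(({b} | (~{c})) ^ {d})",
--     "F4": lambda b, c, d: f"(({b} & {d}) | ({c} & (~{d})))",
--     "F5": lambda b, c, d: f"({b} ^ ({c} | (~{d})))",
-- }
--
-- def generate_round(round_name, f_left, k_left, f_right, k_right, round_data):
--     """Generate WGSL code for one round (direct interpolation, no placeholder passes)."""
--     def emit(entry):
--         vars_str, r_left, s_left, r_right, s_right = entry
--         a, b, c, d, e = (v.lower() for v in vars_str.split(','))
--         expr_l = F_EXPRS[f_left](b, c, d)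
--         expr_r = F_EXPRS[f_right](b + 'p', c + 'p', d + 'p')
--         return (
--             f"    {a} += {expr_l} + block[{r_left}] + {k_left}; {a} = rol({a}, {s_left}u) + {e}; {c} = rol({c}, 10u);",
--             f"    {a}p += {expr_r} + block[{r_right}] + {k_right}; {a}p = rol({a}p, {s_right}u) + {e}p; {c}p = rol({c}p, 10u);",
--         )
--     header = f"    // {round_name.capitalize()}: {f_left} left, {f_right} right"
--     return '\n'.join([header] + [line for entry in round_data for line in emit(entry)])
-- ===== Notes on version B (the rewrite author's own statement) =====
-- stated objective: idiomatic
-- what changed: apply_func's two-pass placeholder replace (b->___b___->value) is replaced by a table of direct per-template interpolations (one f-string lambda per F1..F5), and the lines list is built with a comprehension over round_data instead of an accumulating loop.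
import Mathlib
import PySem

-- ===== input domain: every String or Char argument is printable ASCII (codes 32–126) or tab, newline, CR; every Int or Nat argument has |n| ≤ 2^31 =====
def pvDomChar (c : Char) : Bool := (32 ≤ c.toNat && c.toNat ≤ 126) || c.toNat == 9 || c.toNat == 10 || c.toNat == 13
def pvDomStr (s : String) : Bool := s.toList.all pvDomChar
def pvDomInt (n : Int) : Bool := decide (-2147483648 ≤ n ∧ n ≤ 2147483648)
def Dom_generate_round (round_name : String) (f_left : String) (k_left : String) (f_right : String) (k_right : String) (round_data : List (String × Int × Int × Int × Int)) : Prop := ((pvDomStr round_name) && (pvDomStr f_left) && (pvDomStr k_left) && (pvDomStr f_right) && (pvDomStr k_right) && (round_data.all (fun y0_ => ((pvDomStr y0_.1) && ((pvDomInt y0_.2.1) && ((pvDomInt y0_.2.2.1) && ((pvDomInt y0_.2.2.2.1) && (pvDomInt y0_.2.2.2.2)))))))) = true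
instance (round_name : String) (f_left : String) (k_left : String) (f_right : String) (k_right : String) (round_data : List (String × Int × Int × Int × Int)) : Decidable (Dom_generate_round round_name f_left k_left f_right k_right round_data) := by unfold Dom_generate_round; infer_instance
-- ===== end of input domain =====

-- B replaces A's two-pass placeholder substitution with direct per-template interpolation and a
-- comprehension over round_data (objective: idiomatic; same asymptotic cost).

-- Shared hand port of str.capitalize (exact on the ASCII domain: first char uppercased — for ASCII
-- title-case = upper-case — and the rest lowercased); both Pythons call round_name.capitalize().
def pvCap (s : List Char) : List Char :=
  match s with
  | [] => []
  | ch :: t => PySem.Chars.upperChar ch :: PySem.Chars.lower t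

-- Shared port of the one f-string both Pythons build for each generated line (identical text in Source A and Source B).
def pvLine (a expr : List Char) (r : Int) (k : List Char) (s : Int) (e c : List Char) : List Char :=
  "    ".toList ++ a ++ " += ".toList ++ expr ++ " + block[".toList ++ PySem.Int.toChars r ++
  "] + ".toList ++ k ++ "; ".toList ++ a ++ " = rol(".toList ++ a ++ ", ".toList ++
  PySem.Int.toChars s ++ "u) + ".toList ++ e ++ "; ".toList ++ c ++ " = rol(".toList ++ c ++ ", 10u);".toList

-- ===== PORT A =====

-- module-level dict f_functions
def pvFFunctions : PySem.Dict (List Char) (List Char) :=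
  PySem.Dict.ofList
    [("F1".toList, "(b ^ c ^ d)".toList),
     ("F2".toList, "((b & c) | ((~b) & d))".toList),
     ("F3".toList, "((b | (~c)) ^ d)".toList),
     ("F4".toList, "((b & d) | (c & (~d)))".toList),
     ("F5".toList, "(b ^ (c | (~d)))".toList)]

-- apply_func: two passes of str.replace over the var_map (placeholders, then values)
def pvApplyFunc (expr : List Char) (vm : List (List Char × List Char)) : List Char :=
  let pass1 := vm.foldl (fun r p => PySem.Chars.replace r p.1 ("___".toList ++ p.1 ++ "___".toList)) expr
  vm.foldl (fun r p => PySem.Chars.replace r ("___".toList ++ p.1 ++ "___".toList) p.2) pass1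

-- loop body of A: the two lines appended for one round_data entry ([] on a malformed entry, where
-- Python raises — excluded by Pre_)
def pvAEntryLines (f_left f_right k_left k_right : String) (y : String × Int × Int × Int × Int) :
    List (List Char) :=
  match (PySem.Chars.splitOn y.1.toList ",".toList).map PySem.Chars.lower with
  | [a, b, c, d, e] =>
    let fl := pvApplyFunc (PySem.Dict.getD pvFFunctions f_left.toList [])
      [("b".toList, b), ("c".toList, c), ("d".toList, d)]
    let fr := pvApplyFunc (PySem.Dict.getD pvFFunctions f_right.toList [])
      [("b".toList, b ++ ['p']), ("c".toList, c ++ ['p']), ("d".toList, d ++ ['p'])]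
    [pvLine a fl y.2.1 k_left.toList y.2.2.1 e c,
     pvLine (a ++ ['p']) fr y.2.2.2.1 k_right.toList y.2.2.2.2 (e ++ ['p']) (c ++ ['p'])]
  | _ => []

def generate_round (round_name : String) (f_left : String) (k_left : String) (f_right : String) (k_right : String) (round_data : List (String × Int × Int × Int × Int)) : String :=
  let header := "    // ".toList ++ pvCap round_name.toList ++ ": ".toList ++ f_left.toList ++
    " left, ".toList ++ f_right.toList ++ " right".toList
  let lines := round_data.foldl (fun acc y => acc ++ pvAEntryLines f_left f_right k_left k_right y) [header]
  String.mk (PySem.Chars.join ['\n'] lines)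

-- ===== PORT B =====

-- F_EXPRS: one direct interpolation per function name (Source B's lambda table)
def pvExprB (f : List Char) (b c d : List Char) : List Char :=
  if f = "F1".toList then "(".toList ++ b ++ " ^ ".toList ++ c ++ " ^ ".toList ++ d ++ ")".toList
  else if f = "F2".toList then "((".toList ++ b ++ " & ".toList ++ c ++ ") | ((~".toList ++ b ++ ") & ".toList ++ d ++ "))".toList
  else if f = "F3".toList then "((".toList ++ b ++ " | (~".toList ++ c ++ ")) ^ ".toList ++ d ++ ")".toList
  else if f = "F4".toList then "((".toList ++ b ++ " & ".toList ++ d ++ ") | (".toList ++ c ++ " & (~".toList ++ d ++ ")))".toList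
  else if f = "F5".toList then "(".toList ++ b ++ " ^ (".toList ++ c ++ " | (~".toList ++ d ++ ")))".toList
  else []

-- emit: the pair of lines for one entry ([] where Python raises — excluded by Pre_)
def pvBEntryLines (f_left f_right k_left k_right : String) (y : String × Int × Int × Int × Int) :
    List (List Char) :=
  match (PySem.Chars.splitOn y.1.toList ",".toList).map PySem.Chars.lower with
  | [a, b, c, d, e] =>
    [pvLine a (pvExprB f_left.toList b c d) y.2.1 k_left.toList y.2.2.1 e c,
     pvLine (a ++ ['p'])
       (pvExprB f_right.toList (b ++ ['p']) (c ++ ['p']) (d ++ ['p']))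
       y.2.2.2.1 k_right.toList y.2.2.2.2 (e ++ ['p']) (c ++ ['p'])]
  | _ => []

def generate_round_alt (round_name : String) (f_left : String) (k_left : String) (f_right : String) (k_right : String) (round_data : List (String × Int × Int × Int × Int)) : String :=
  let header := "    // ".toList ++ pvCap round_name.toList ++ ": ".toList ++ f_left.toList ++
    " left, ".toList ++ f_right.toList ++ " right".toList
  let body := round_data.flatMap (pvBEntryLines f_left f_right k_left k_right)
  String.mk (PySem.Chars.join ['\n'] (header :: body))

-- ===== PRECONDITION & SPEC =====
-- Pre_ excludes (a) inputs with a non-empty round_data and f_left/f_right outside F1–F5, and entries whose first component does not split on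
-- ',' into exactly 5 parts, where A raises KeyError/ValueError, and (b) entries whose 2nd or 3rd
-- variable name contains '_', where A's '___x___' placeholder markers can collide with the name and
-- cascade substitutions — a defensible-corner artefact of the placeholder trick, excluded
-- conservatively (on most such names A and B still agree).
def Pre_generate_round (round_name : String) (f_left : String) (k_left : String) (f_right : String) (k_right : String) (round_data : List (String × Int × Int × Int × Int)) : Prop :=
  ∀ y ∈ round_data,
    (f_left = "F1" ∨ f_left = "F2" ∨ f_left = "F3" ∨ f_left = "F4" ∨ f_left = "F5") ∧
    (f_right = "F1" ∨ f_right = "F2" ∨ f_right = "F3" ∨ f_right = "F4" ∨ f_right = "F5") ∧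
    (PySem.Chars.splitOn y.1.toList ",".toList).length = 5 ∧
    '_' ∉ PySem.Chars.lower ((PySem.Chars.splitOn y.1.toList ",".toList).getD 1 []) ∧
    '_' ∉ PySem.Chars.lower ((PySem.Chars.splitOn y.1.toList ",".toList).getD 2 [])
instance (round_name : String) (f_left : String) (k_left : String) (f_right : String) (k_right : String) (round_data : List (String × Int × Int × Int × Int)) : Decidable (Pre_generate_round round_name f_left k_left f_right k_right round_data) := by unfold Pre_generate_round; infer_instance

def pvWitness_generate_round : String × String × String × String × String × (List (String × Int × Int × Int × Int)) :=
  ("round1", "F1", "0x00000000u", "F2", "0x50a28be6u", [("A,B,C,D,E", 0, 11, 5, 8)])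

def Spec_generate_round (round_name : String) (f_left : String) (k_left : String) (f_right : String) (k_right : String) (round_data : List (String × Int × Int × Int × Int)) (out : String) : Prop := out = generate_round_alt round_name f_left k_left f_right k_right round_data
instance (round_name : String) (f_left : String) (k_left : String) (f_right : String) (k_right : String) (round_data : List (String × Int × Int × Int × Int)) (out : String) : Decidable (Spec_generate_round round_name f_left k_left f_right k_right round_data out) := by unfold Spec_generate_round; infer_instance

-- ===== CLAIM (what is proved, stated in full; the proofs are below) =====
def Claim_equal_generate_round : Prop := ∀ (round_name : String) (f_left : String) (k_left : String) (f_right : String) (k_right : String) (round_data : List (String × Int × Int × Int × Int)), Dom_generate_round round_name f_left k_left f_right k_right round_data → Pre_generate_round round_name f_left k_left f_right k_right round_data → Spec_generate_round round_name f_left k_left f_right k_right round_data (generate_round round_name f_left k_left f_right k_right round_data)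

-- ===== LEMMAS AND PROOFS =====

theorem pvWitness_ok :
    Dom_generate_round (pvWitness_generate_round.1) (pvWitness_generate_round.2.1) (pvWitness_generate_round.2.2.1) (pvWitness_generate_round.2.2.2.1) (pvWitness_generate_round.2.2.2.2.1) (pvWitness_generate_round.2.2.2.2.2) ∧
    Pre_generate_round (pvWitness_generate_round.1) (pvWitness_generate_round.2.1) (pvWitness_generate_round.2.2.1) (pvWitness_generate_round.2.2.2.1) (pvWitness_generate_round.2.2.2.2.1) (pvWitness_generate_round.2.2.2.2.2) := by
  decide

-- ---- generic facts about PySem.Chars.replace's scanner ----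

theorem pvGo_nil (old new : List Char) (fuel : Nat) (acc : List Char) :
    PySem.Chars.replace.go old new fuel [] acc = acc.reverse := by
  cases fuel <;> simp [PySem.Chars.replace.go]

theorem pvGo_skip (old new : List Char) (x : List Char) :
    ∀ (fuel : Nat) (l acc : List Char),
    (∀ i < x.length, old.isPrefixOf (x.drop i ++ l) = false) →
    x.length + l.length ≤ fuel →
    PySem.Chars.replace.go old new fuel (x ++ l) acc
      = PySem.Chars.replace.go old new (fuel - x.length) l (x.reverse ++ acc) := by
  induction x with
  | nil => intro fuel l acc _ _; simp
  | cons c t ih =>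
    intro fuel l acc hnm hf
    cases fuel with
    | zero => simp at hf
    | succ f =>
      have h0 := hnm 0 (by simp)
      simp at h0
      rw [List.cons_append]
      rw [show PySem.Chars.replace.go old new (f+1) (c :: (t ++ l)) acc
            = PySem.Chars.replace.go old new f (t ++ l) (c :: acc) by
        simp [PySem.Chars.replace.go, h0]]
      rw [ih f l (c :: acc) (fun i hi => by
            have := hnm (i+1) (by simpa using Nat.succ_lt_succ hi)
            simpa using this)
          (by simp at hf ⊢; omega)]
      simp [List.append_assoc]

theorem pvGo_match (old new : List Char) (fuel : Nat) (l acc : List Char)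
    (hold : old ≠ []) (hf : 1 ≤ fuel) :
    PySem.Chars.replace.go old new fuel (old ++ l) acc
      = PySem.Chars.replace.go old new (fuel - 1) l (new.reverse ++ acc) := by
  cases fuel with
  | zero => omega
  | succ f =>
    obtain ⟨c, t, rfl⟩ : ∃ c t, old = c :: t := by
      cases old with | nil => exact absurd rfl hold | cons c t => exact ⟨c, t, rfl⟩
    have hpre : (c :: t).isPrefixOf ((c :: t) ++ l) = true := by
      simpa using List.isPrefixOf_iff_prefix.mpr (List.prefix_append _ _)
    simp [PySem.Chars.replace.go, hpre]

theorem pvGo_noMatch (old new : List Char) (y : List Char) (fuel : Nat) (acc : List Char)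
    (hnm : ∀ i < y.length, old.isPrefixOf (y.drop i) = false)
    (hf : y.length ≤ fuel) :
    PySem.Chars.replace.go old new fuel y acc = acc.reverse ++ y := by
  have := pvGo_skip old new y fuel [] acc (by simpa using hnm) (by simpa using hf)
  simpa [pvGo_nil] using this

theorem pvReplace_go (s old new : List Char) (hold : old ≠ []) :
    PySem.Chars.replace s old new = PySem.Chars.replace.go old new s.length s [] := by
  have : old.isEmpty = false := by simpa [List.isEmpty_iff] using hold
  simp [PySem.Chars.replace, this]

-- no occurrence of a pattern starting with '_' can begin inside a '_'-free block
theorem pvNM_clean (old x r : List Char) (hh : old.head? = some '_') (hx : '_' ∉ x) :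
    ∀ i < x.length, old.isPrefixOf (x.drop i ++ r) = false := by
  obtain ⟨t, rfl⟩ : ∃ t, old = '_' :: t := by
    cases old with
    | nil => simp at hh
    | cons a t => simp at hh; exact ⟨t, by rw [hh]⟩
  intro i hi
  have hne : x[i] ≠ '_' := fun h => hx (h ▸ List.getElem_mem hi)
  have hb : ('_' == x[i]) = false := by simpa [beq_iff_eq] using (Ne.symm hne)
  rw [List.drop_eq_getElem_cons hi, List.cons_append]
  show (('_' == x[i]) && t.isPrefixOf _) = false
  simp [hb]

theorem pvNM_append (old u v r : List Char)
    (h1 : ∀ i < u.length, old.isPrefixOf (u.drop i ++ (v ++ r)) = false)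
    (h2 : ∀ i < v.length, old.isPrefixOf (v.drop i ++ r) = false) :
    ∀ i < (u ++ v).length, old.isPrefixOf ((u ++ v).drop i ++ r) = false := by
  intro i hi
  by_cases h : i < u.length
  · rw [List.drop_append_of_le_length (le_of_lt h), List.append_assoc]
    exact h1 i h
  · have h' : u.length ≤ i := Nat.le_of_not_lt h
    rw [List.drop_append, List.drop_eq_nil_of_le h', List.nil_append]
    exact h2 (i - u.length) (by simp at hi; omega)

-- one occurrence: replace (x ++ old ++ y) old new = x ++ new ++ y
theorem pvReplace_single (old new x y s : List Char)
    (hs : s = x ++ (old ++ y)) (hold : old ≠ [])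
    (hx : ∀ i < x.length, old.isPrefixOf (x.drop i ++ (old ++ y)) = false)
    (hy : ∀ i < y.length, old.isPrefixOf (y.drop i) = false) :
    PySem.Chars.replace s old new = x ++ (new ++ y) := by
  have ho1 : 1 ≤ old.length := List.length_pos_of_ne_nil hold
  rw [hs, pvReplace_go _ _ _ hold]
  rw [pvGo_skip old new x _ _ _ hx (by simp)]
  rw [pvGo_match old new _ _ _ hold (by simp; omega)]
  rw [pvGo_noMatch old new y _ _ hy (by simp; omega)]
  simp [List.reverse_append, List.append_assoc]

-- two occurrences
theorem pvReplace_double (old new x z y s : List Char)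
    (hs : s = x ++ (old ++ (z ++ (old ++ y)))) (hold : old ≠ [])
    (hx : ∀ i < x.length, old.isPrefixOf (x.drop i ++ (old ++ (z ++ (old ++ y)))) = false)
    (hz : ∀ i < z.length, old.isPrefixOf (z.drop i ++ (old ++ y)) = false)
    (hy : ∀ i < y.length, old.isPrefixOf (y.drop i) = false) :
    PySem.Chars.replace s old new = x ++ (new ++ (z ++ (new ++ y))) := by
  have ho1 : 1 ≤ old.length := List.length_pos_of_ne_nil hold
  rw [hs, pvReplace_go _ _ _ hold]
  rw [pvGo_skip old new x _ _ _ hx (by simp)]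
  rw [pvGo_match old new _ _ _ hold (by simp; omega)]
  rw [pvGo_skip old new z _ _ _ hz (by simp; omega)]
  rw [pvGo_match old new _ _ _ hold (by simp; omega)]
  rw [pvGo_noMatch old new y _ _ hy (by simp; omega)]
  simp [List.reverse_append, List.append_assoc]

-- ---- the five templates: A's second pass = direct interpolation, given '_'-free b and c ----

theorem pvF1 (vb vc vd : List Char) (hb : '_' ∉ vb) (hc : '_' ∉ vc) :
    PySem.Chars.replace (PySem.Chars.replace (PySem.Chars.replace
        "(___b___ ^ ___c___ ^ ___d___)".toList "___b___".toList vb)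
        "___c___".toList vc) "___d___".toList vd
      = "(".toList ++ (vb ++ (" ^ ".toList ++ (vc ++ (" ^ ".toList ++ (vd ++ ")".toList))))) := by
  rw [pvReplace_single "___b___".toList vb "(".toList " ^ ___c___ ^ ___d___)".toList _
    (by decide) (by decide) (by decide) (by decide)]
  rw [pvReplace_single "___c___".toList vc ("(".toList ++ (vb ++ " ^ ".toList)) " ^ ___d___)".toList _
    (by rw [show (" ^ ___c___ ^ ___d___)".toList : List Char)
          = " ^ ".toList ++ ("___c___".toList ++ " ^ ___d___)".toList) from by decide]
        simp [List.append_assoc])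
    (by decide)
    (pvNM_clean _ _ _ (by decide)
      (by simp only [List.mem_append, not_or]; exact ⟨by decide, hb, by decide⟩))
    (by decide)]
  rw [pvReplace_single "___d___".toList vd
      ("(".toList ++ (vb ++ (" ^ ".toList ++ (vc ++ " ^ ".toList)))) ")".toList _
    (by rw [show (" ^ ___d___)".toList : List Char)
          = " ^ ".toList ++ ("___d___".toList ++ ")".toList) from by decide]
        simp [List.append_assoc])
    (by decide)
    (pvNM_clean _ _ _ (by decide)
      (by simp only [List.mem_append, not_or]; exact ⟨by decide, hb, by decide, hc, by decide⟩))
    (by decide)]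
  simp [List.append_assoc]

theorem pvF2 (vb vc vd : List Char) (hb : '_' ∉ vb) (hc : '_' ∉ vc) :
    PySem.Chars.replace (PySem.Chars.replace (PySem.Chars.replace
        "((___b___ & ___c___) | ((~___b___) & ___d___))".toList "___b___".toList vb)
        "___c___".toList vc) "___d___".toList vd
      = "((".toList ++ (vb ++ (" & ".toList ++ (vc ++ (") | ((~".toList ++ (vb ++ (") & ".toList ++ (vd ++ "))".toList))))))) := by
  rw [pvReplace_double "___b___".toList vb "((".toList " & ___c___) | ((~".toList ") & ___d___))".toList _
    (by decide) (by decide) (by decide) (by decide) (by decide)]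
  rw [pvReplace_single "___c___".toList vc ("((".toList ++ (vb ++ " & ".toList))
      (") | ((~".toList ++ (vb ++ ") & ___d___))".toList)) _
    (by rw [show (" & ___c___) | ((~".toList : List Char)
          = " & ".toList ++ ("___c___".toList ++ ") | ((~".toList) from by decide]
        simp [List.append_assoc])
    (by decide)
    (pvNM_clean _ _ _ (by decide)
      (by simp only [List.mem_append, not_or]; exact ⟨by decide, hb, by decide⟩))
    (by
      have := pvNM_append "___c___".toList (") | ((~".toList ++ vb) ") & ___d___))".toList []
        (pvNM_clean _ _ _ (by decide)
          (by simp only [List.mem_append, not_or]; exact ⟨by decide, hb⟩))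
        (by decide)
      intro i hi
      have h2 := this i (by simpa [List.append_assoc] using hi)
      simpa [List.append_assoc] using h2)]
  rw [pvReplace_single "___d___".toList vd
      ("((".toList ++ (vb ++ (" & ".toList ++ (vc ++ (") | ((~".toList ++ (vb ++ ") & ".toList))))))
      "))".toList _
    (by rw [show (") & ___d___))".toList : List Char)
          = ") & ".toList ++ ("___d___".toList ++ "))".toList) from by decide]
        simp [List.append_assoc])
    (by decide)
    (pvNM_clean _ _ _ (by decide)
      (by simp only [List.mem_append, not_or]
          exact ⟨by decide, hb, by decide, hc, by decide, hb, by decide⟩))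
    (by decide)]
  simp [List.append_assoc]

theorem pvF3 (vb vc vd : List Char) (hb : '_' ∉ vb) (hc : '_' ∉ vc) :
    PySem.Chars.replace (PySem.Chars.replace (PySem.Chars.replace
        "((___b___ | (~___c___)) ^ ___d___)".toList "___b___".toList vb)
        "___c___".toList vc) "___d___".toList vd
      = "((".toList ++ (vb ++ (" | (~".toList ++ (vc ++ (")) ^ ".toList ++ (vd ++ ")".toList))))) := by
  rw [pvReplace_single "___b___".toList vb "((".toList " | (~___c___)) ^ ___d___)".toList _
    (by decide) (by decide) (by decide) (by decide)]
  rw [pvReplace_single "___c___".toList vc ("((".toList ++ (vb ++ " | (~".toList)) ")) ^ ___d___)".toList _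
    (by rw [show (" | (~___c___)) ^ ___d___)".toList : List Char)
          = " | (~".toList ++ ("___c___".toList ++ ")) ^ ___d___)".toList) from by decide]
        simp [List.append_assoc])
    (by decide)
    (pvNM_clean _ _ _ (by decide)
      (by simp only [List.mem_append, not_or]; exact ⟨by decide, hb, by decide⟩))
    (by decide)]
  rw [pvReplace_single "___d___".toList vd
      ("((".toList ++ (vb ++ (" | (~".toList ++ (vc ++ ")) ^ ".toList)))) ")".toList _
    (by rw [show (")) ^ ___d___)".toList : List Char)
          = ")) ^ ".toList ++ ("___d___".toList ++ ")".toList) from by decide]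
        simp [List.append_assoc])
    (by decide)
    (pvNM_clean _ _ _ (by decide)
      (by simp only [List.mem_append, not_or]; exact ⟨by decide, hb, by decide, hc, by decide⟩))
    (by decide)]
  simp [List.append_assoc]

theorem pvF4 (vb vc vd : List Char) (hb : '_' ∉ vb) (hc : '_' ∉ vc) :
    PySem.Chars.replace (PySem.Chars.replace (PySem.Chars.replace
        "((___b___ & ___d___) | (___c___ & (~___d___)))".toList "___b___".toList vb)
        "___c___".toList vc) "___d___".toList vd
      = "((".toList ++ (vb ++ (" & ".toList ++ (vd ++ (") | (".toList ++ (vc ++ (" & (~".toList ++ (vd ++ ")))".toList))))))) := by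
  rw [pvReplace_single "___b___".toList vb "((".toList " & ___d___) | (___c___ & (~___d___)))".toList _
    (by decide) (by decide) (by decide) (by decide)]
  rw [pvReplace_single "___c___".toList vc ("((".toList ++ (vb ++ " & ___d___) | (".toList))
      " & (~___d___)))".toList _
    (by rw [show (" & ___d___) | (___c___ & (~___d___)))".toList : List Char)
          = " & ___d___) | (".toList ++ ("___c___".toList ++ " & (~___d___)))".toList) from by decide]
        simp [List.append_assoc])
    (by decide)
    (by
      have := pvNM_append "___c___".toList "((".toList (vb ++ " & ___d___) | (".toList)
          ("___c___".toList ++ " & (~___d___)))".toList)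
        (pvNM_clean _ _ _ (by decide) (by decide))
        (pvNM_append "___c___".toList vb " & ___d___) | (".toList
            ("___c___".toList ++ " & (~___d___)))".toList)
          (pvNM_clean _ _ _ (by decide) hb)
          (by decide))
      intro i hi
      have h2 := this i (by simpa [List.append_assoc] using hi)
      simpa [List.append_assoc] using h2)
    (by decide)]
  rw [pvReplace_double "___d___".toList vd ("((".toList ++ (vb ++ " & ".toList))
      (") | (".toList ++ (vc ++ " & (~".toList)) ")))".toList _
    (by rw [show (" & ___d___) | (".toList : List Char)
          = " & ".toList ++ ("___d___".toList ++ ") | (".toList) from by decide,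
        show (" & (~___d___)))".toList : List Char)
          = " & (~".toList ++ ("___d___".toList ++ ")))".toList) from by decide]
        simp [List.append_assoc])
    (by decide)
    (pvNM_clean _ _ _ (by decide)
      (by simp only [List.mem_append, not_or]; exact ⟨by decide, hb, by decide⟩))
    (pvNM_clean _ _ _ (by decide)
      (by simp only [List.mem_append, not_or]; exact ⟨by decide, hc, by decide⟩))
    (by decide)]
  simp [List.append_assoc]

theorem pvF5 (vb vc vd : List Char) (hb : '_' ∉ vb) (hc : '_' ∉ vc) :
    PySem.Chars.replace (PySem.Chars.replace (PySem.Chars.replace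
        "(___b___ ^ (___c___ | (~___d___)))".toList "___b___".toList vb)
        "___c___".toList vc) "___d___".toList vd
      = "(".toList ++ (vb ++ (" ^ (".toList ++ (vc ++ (" | (~".toList ++ (vd ++ ")))".toList))))) := by
  rw [pvReplace_single "___b___".toList vb "(".toList " ^ (___c___ | (~___d___)))".toList _
    (by decide) (by decide) (by decide) (by decide)]
  rw [pvReplace_single "___c___".toList vc ("(".toList ++ (vb ++ " ^ (".toList)) " | (~___d___)))".toList _
    (by rw [show (" ^ (___c___ | (~___d___)))".toList : List Char)
          = " ^ (".toList ++ ("___c___".toList ++ " | (~___d___)))".toList) from by decide]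
        simp [List.append_assoc])
    (by decide)
    (pvNM_clean _ _ _ (by decide)
      (by simp only [List.mem_append, not_or]; exact ⟨by decide, hb, by decide⟩))
    (by decide)]
  rw [pvReplace_single "___d___".toList vd
      ("(".toList ++ (vb ++ (" ^ (".toList ++ (vc ++ " | (~".toList)))) ")))".toList _
    (by rw [show (" | (~___d___)))".toList : List Char)
          = " | (~".toList ++ ("___d___".toList ++ ")))".toList) from by decide]
        simp [List.append_assoc])
    (by decide)
    (pvNM_clean _ _ _ (by decide)
      (by simp only [List.mem_append, not_or]; exact ⟨by decide, hb, by decide, hc, by decide⟩))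
    (by decide)]
  simp [List.append_assoc]

-- ---- gluing ----

theorem pvLen5 {α : Type} (l : List α) (h : l.length = 5) :
    ∃ a b c d e, l = [a, b, c, d, e] := by
  rcases l with _ | ⟨a, _ | ⟨b, _ | ⟨c, _ | ⟨d, _ | ⟨e, _ | ⟨f, t⟩⟩⟩⟩⟩⟩ <;> simp_all

theorem pvFlatMap_congr {α β : Type} (l : List α) (f g : α → List β)
    (h : ∀ x ∈ l, f x = g x) : l.flatMap f = l.flatMap g := by
  induction l with
  | nil => rfl
  | cons a t ih =>
    simp only [List.flatMap_cons, h a (by simp), ih (fun x hx => h x (by simp [hx]))]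

theorem pvExpr_eq (f : String)
    (hf : f = "F1" ∨ f = "F2" ∨ f = "F3" ∨ f = "F4" ∨ f = "F5")
    (b c d : List Char) (hb : '_' ∉ b) (hc : '_' ∉ c) :
    pvApplyFunc (PySem.Dict.getD pvFFunctions f.toList [])
        [("b".toList, b), ("c".toList, c), ("d".toList, d)]
      = pvExprB f.toList b c d := by
  rcases hf with rfl | rfl | rfl | rfl | rfl <;>
    simp only [pvApplyFunc, List.foldl] <;>
    simp only [show ("___".toList ++ "b".toList ++ "___".toList : List Char) = "___b___".toList from by decide,
      show ("___".toList ++ "c".toList ++ "___".toList : List Char) = "___c___".toList from by decide,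
      show ("___".toList ++ "d".toList ++ "___".toList : List Char) = "___d___".toList from by decide] <;>
    [rw [show PySem.Chars.replace (PySem.Chars.replace (PySem.Chars.replace
          (PySem.Dict.getD pvFFunctions "F1".toList []) "b".toList "___b___".toList)
          "c".toList "___c___".toList) "d".toList "___d___".toList
        = "(___b___ ^ ___c___ ^ ___d___)".toList from by decide,
      pvF1 b c d hb hc];
rw [show PySem.Chars.replace (PySem.Chars.replace (PySem.Chars.replace
          (PySem.Dict.getD pvFFunctions "F2".toList []) "b".toList "___b___".toList)
          "c".toList "___c___".toList) "d".toList "___d___".toList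
        = "((___b___ & ___c___) | ((~___b___) & ___d___))".toList from by decide,
      pvF2 b c d hb hc];
rw [show PySem.Chars.replace (PySem.Chars.replace (PySem.Chars.replace
          (PySem.Dict.getD pvFFunctions "F3".toList []) "b".toList "___b___".toList)
          "c".toList "___c___".toList) "d".toList "___d___".toList
        = "((___b___ | (~___c___)) ^ ___d___)".toList from by decide,
      pvF3 b c d hb hc];
rw [show PySem.Chars.replace (PySem.Chars.replace (PySem.Chars.replace
          (PySem.Dict.getD pvFFunctions "F4".toList []) "b".toList "___b___".toList)
          "c".toList "___c___".toList) "d".toList "___d___".toList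
        = "((___b___ & ___d___) | (___c___ & (~___d___)))".toList from by decide,
      pvF4 b c d hb hc];
rw [show PySem.Chars.replace (PySem.Chars.replace (PySem.Chars.replace
          (PySem.Dict.getD pvFFunctions "F5".toList []) "b".toList "___b___".toList)
          "c".toList "___c___".toList) "d".toList "___d___".toList
        = "(___b___ ^ (___c___ | (~___d___)))".toList from by decide,
      pvF5 b c d hb hc]] <;>
    simp [pvExprB, List.append_assoc]

theorem pvEntry_eq (f_left f_right k_left k_right : String)
    (hfl : f_left = "F1" ∨ f_left = "F2" ∨ f_left = "F3" ∨ f_left = "F4" ∨ f_left = "F5")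
    (hfr : f_right = "F1" ∨ f_right = "F2" ∨ f_right = "F3" ∨ f_right = "F4" ∨ f_right = "F5")
    (y : String × Int × Int × Int × Int)
    (h5 : (PySem.Chars.splitOn y.1.toList ",".toList).length = 5)
    (hb : '_' ∉ PySem.Chars.lower ((PySem.Chars.splitOn y.1.toList ",".toList).getD 1 []))
    (hc : '_' ∉ PySem.Chars.lower ((PySem.Chars.splitOn y.1.toList ",".toList).getD 2 [])) :
    pvAEntryLines f_left f_right k_left k_right y
      = pvBEntryLines f_left f_right k_left k_right y := by
  obtain ⟨v0, v1, v2, v3, v4, hv⟩ := pvLen5 _ h5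
  rw [hv] at hb hc
  simp only [List.getD, List.getElem?_cons_succ, List.getElem?_cons_zero, Option.getD_some] at hb hc
  have hbp : '_' ∉ PySem.Chars.lower v1 ++ ['p'] := by
    simp only [List.mem_append, not_or]; exact ⟨hb, by decide⟩
  have hcp : '_' ∉ PySem.Chars.lower v2 ++ ['p'] := by
    simp only [List.mem_append, not_or]; exact ⟨hc, by decide⟩
  simp only [pvAEntryLines, pvBEntryLines, hv, List.map]
  rw [pvExpr_eq f_left hfl _ _ _ hb hc, pvExpr_eq f_right hfr _ _ _ hbp hcp]

-- ===== VERDICT (by name: the statement is the Claim_ definition above) =====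
theorem generate_round_spec : Claim_equal_generate_round := by
  intro round_name f_left k_left f_right k_right round_data _hdom hall
  unfold Spec_generate_round generate_round generate_round_alt
  dsimp only
  congr 1
  rw [PySem.List.foldl_append_eq_flatMap]
  rw [pvFlatMap_congr round_data _ _ (fun y hy =>
    pvEntry_eq f_left f_right k_left k_right (hall y hy).1 (hall y hy).2.1 y
      (hall y hy).2.2.1 (hall y hy).2.2.2.1 (hall y hy).2.2.2.2)]
  simp
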